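-- pv_equiv track=rewrite | github.com/sevgibayansalduzz/NLP-WORKS | Corrector/convert_turkish.py | convert_to_turkish_letter
-- ===== SOURCE A (Python) =====
-- def convert_to_turkish_letter(sentence):
--     turkish_letters={'i':'ı', 'o':'ö', 'u':'ü', 's': 'ş', 'c':'ç', 'g':'ğ'}
--     possible_sentences=[sentence]
--
--     for index,letter in enumerate(sentence):
--         if letter in turkish_letters:
--             i=0
--             size=len(possible_sentences)
--             while i < size:
--                 sentence=possible_sentences[i]
--                 possible_sentences.append(sentence[:index]+turkish_letters[sentence[index]]+sentence[index+1:])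
--                 i += 1
--     return possible_sentences
-- ===== SOURCE B (Python) =====
-- def convert_to_turkish_letter(sentence):
--     turkish_letters = {'i': 'ı', 'o': 'ö', 'u': 'ü', 's': 'ş', 'c': 'ç', 'g': 'ğ'}
--     positions = [i for i, ch in enumerate(sentence) if ch in turkish_letters]
--     results = []
--     for n in range(1 << len(positions)):
--         chars = list(sentence)
--         for i, p in enumerate(positions):
--             if (n >> i) & 1:
--                 chars[p] = turkish_letters[chars[p]]
--         results.append(''.join(chars))
--     return results
-- ===== Notes on version B (the rewrite author's own statement) =====
-- stated objective: alternative
-- what changed: A grows the result list in place, re-scanning and doubling it with an inner while loop at every convertible letter; B scans the sentence once to collect the convertible positions and then directly constructs output n from the bits of n (bit i set = replace at position i), producing the same 2^k strings in the same order.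
import Mathlib
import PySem

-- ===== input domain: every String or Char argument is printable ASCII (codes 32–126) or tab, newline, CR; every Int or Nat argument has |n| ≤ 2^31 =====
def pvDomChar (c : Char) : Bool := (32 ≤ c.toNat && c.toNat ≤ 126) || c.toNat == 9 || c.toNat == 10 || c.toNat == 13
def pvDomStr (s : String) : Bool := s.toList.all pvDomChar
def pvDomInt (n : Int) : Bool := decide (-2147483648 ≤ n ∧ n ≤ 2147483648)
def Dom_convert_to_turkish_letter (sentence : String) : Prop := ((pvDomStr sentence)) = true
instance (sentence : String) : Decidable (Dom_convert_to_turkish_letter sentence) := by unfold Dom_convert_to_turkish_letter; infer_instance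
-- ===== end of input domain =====

-- B replaces A's in-place doubling of the result list (an inner while re-scanning the list at
-- every convertible letter) by a single direct enumeration: collect the convertible positions
-- once, then build output number n from the bits of n (bit i ⇒ replace at position i);
-- objective: alternative (a different algorithm of the same cost), same return value.

-- the dict literal turkish_letters (shared by both programs)
def turkishLetters : PySem.Dict Char Char :=
  PySem.Dict.mk [('i', 'ı'), ('o', 'ö'), ('u', 'ü'), ('s', 'ş'), ('c', 'ç'), ('g', 'ğ')]

-- ===== PORT A =====
-- inner while body: possible_sentences.append(sentence[:index]+turkish_letters[sentence[index]]+sentence[index+1:])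
-- (the `none` branches are where Python would raise IndexError/KeyError; they are never reached)
def bodyA (idx : Int) (acc : List (List Char)) (i : Int) : List (List Char) :=
  match PySem.List.pyGet? acc i with
  | some s =>
    match PySem.Dict.get? turkishLetters ((PySem.List.pyGet? s idx).getD ' ') with
    | some t =>
        acc ++ [PySem.List.slice s none (some idx) ++ t :: PySem.List.slice s (some (idx + 1)) none]
    | none => acc
  | none => acc

-- outer for body: if letter in turkish_letters: while i < size: …
def stepA (possible : List (List Char)) (il : Int × Char) : List (List Char) :=
  if PySem.Dict.contains turkishLetters il.2 then
    (PySem.List.pyRange 0 (possible.length : Int) 1).foldl (bodyA il.1) possible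
  else possible

def convert_to_turkish_letter (sentence : String) : List String :=
  ((PySem.List.enumerate sentence.toList).foldl stepA [sentence.toList]).map String.ofList

-- ===== PORT B =====
-- inner for of Source B: for i, p in enumerate(positions): if (n >> i) & 1: chars[p] = turkish_letters[chars[p]]
-- (k is the enumerate start; the getD ' ' default is where Python would raise KeyError, never reached)
def maskApply (chars0 : List Char) (positions : List Nat) (k n : Nat) : List Char :=
  (positions.zipIdx k).foldl
    (fun chars pi =>
      if (n >>> pi.2) &&& 1 = 1 then
        chars.set pi.1 ((PySem.Dict.get? turkishLetters (chars.getD pi.1 ' ')).getD ' ')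
      else chars) chars0

def convert_to_turkish_letter_alt (sentence : String) : List String :=
  let chars0 := sentence.toList
  let positions := (chars0.zipIdx.filter (fun p => PySem.Dict.contains turkishLetters p.1)).map (·.2)
  (List.range (1 <<< positions.length)).map (fun n => String.ofList (maskApply chars0 positions 0 n))

-- ===== PRECONDITION & SPEC =====
def Spec_convert_to_turkish_letter (sentence : String) (out : List String) : Prop := out = convert_to_turkish_letter_alt sentence
instance (sentence : String) (out : List String) : Decidable (Spec_convert_to_turkish_letter sentence out) := by unfold Spec_convert_to_turkish_letter; infer_instance

-- ===== CLAIM (what is proved, stated in full; the proofs are below) =====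
def Claim_equal_convert_to_turkish_letter : Prop := ∀ (sentence : String), Dom_convert_to_turkish_letter sentence → Spec_convert_to_turkish_letter sentence (convert_to_turkish_letter sentence)

-- ===== LEMMAS AND PROOFS =====

-- the Turkish replacement of a character (total form; both ports only apply it to mapped letters)
def tsub (c : Char) : Char := (PySem.Dict.get? turkishLetters c).getD ' '

-- what A appends for a variant s at index idx
def fA (idx : Int) (s : List Char) : List Char :=
  PySem.List.slice s none (some idx) ++ tsub ((PySem.List.pyGet? s idx).getD ' ') :: PySem.List.slice s (some (idx + 1)) none

-- the convertible positions of cs, indices started at j (B computes posOf cs 0)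
def posOf (cs : List Char) (j : Nat) : List Nat :=
  ((cs.zipIdx j).filter (fun p => PySem.Dict.contains turkishLetters p.1)).map (·.2)

theorem bodyA_eq (idx : Int) (acc : List (List Char)) (i : Int) (s : List Char)
    (h1 : PySem.List.pyGet? acc i = some s)
    (h2 : (PySem.Dict.get? turkishLetters ((PySem.List.pyGet? s idx).getD ' ')).isSome) :
    bodyA idx acc i = acc ++ [fA idx s] := by
  obtain ⟨t, ht⟩ := Option.isSome_iff_exists.mp h2
  simp [bodyA, h1, ht, fA, tsub]

theorem whileA_aux (idx : Int) (S : List (List Char))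
    (h : ∀ s ∈ S, (PySem.Dict.get? turkishLetters ((PySem.List.pyGet? s idx).getD ' ')).isSome) :
    ∀ (d j : Nat), j + d = S.length →
    (PySem.List.pyRange (j : Int) (S.length : Int) 1).foldl (bodyA idx) (S ++ (S.take j).map (fA idx)) =
      S ++ S.map (fA idx) := by
  intro d
  induction d with
  | zero =>
      intro j hj
      rw [PySem.List.pyRange_one_eq_nil (by omega)]
      simp only [List.foldl_nil]
      rw [show j = S.length by omega, List.take_length]
  | succ d ih =>
      intro j hj
      have hjlt : j < S.length := by omega
      rw [PySem.List.pyRange_one_cons (by exact_mod_cast hjlt)]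
      simp only [List.foldl_cons]
      have hget : PySem.List.pyGet? (S ++ (S.take j).map (fA idx)) (j : Int) = some S[j] := by
        rw [PySem.List.pyGet?_natCast, List.getElem?_append_left hjlt, List.getElem?_eq_getElem hjlt]
      rw [bodyA_eq idx _ _ _ hget (h S[j] (List.getElem_mem hjlt))]
      have hstep : S ++ (S.take j).map (fA idx) ++ [fA idx S[j]] = S ++ (S.take (j+1)).map (fA idx) := by
        simp only [List.map_take]
        rw [List.take_add_one]
        simp [List.getElem?_eq_getElem hjlt]
      rw [hstep, show ((j : Int) + 1) = ((j + 1 : Nat) : Int) by push_cast; ring]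
      exact ih (j + 1) (by omega)

theorem whileA (idx : Int) (S : List (List Char))
    (h : ∀ s ∈ S, (PySem.Dict.get? turkishLetters ((PySem.List.pyGet? s idx).getD ' ')).isSome) :
    (PySem.List.pyRange 0 (S.length : Int) 1).foldl (bodyA idx) S = S ++ S.map (fA idx) := by
  have := whileA_aux idx S h S.length 0 (by omega)
  simpa using this

theorem maskApply_length (ps : List Nat) (cs : List Char) (k n : Nat) :
    (maskApply cs ps k n).length = cs.length := by
  induction ps generalizing cs k with
  | nil => simp [maskApply]
  | cons p t ih =>
      simp only [maskApply, List.zipIdx_cons, List.foldl_cons] at *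
      rw [ih]
      split <;> simp

theorem getD_maskApply_not_mem (ps : List Nat) (cs : List Char) (k n q : Nat) (hq : q ∉ ps) :
    (maskApply cs ps k n).getD q ' ' = cs.getD q ' ' := by
  induction ps generalizing cs k with
  | nil => simp [maskApply]
  | cons p t ih =>
      simp only [List.mem_cons, not_or] at hq
      simp only [maskApply, List.zipIdx_cons, List.foldl_cons] at *
      rw [ih _ _ hq.2]
      split
      · simp [List.getD, List.getElem?_set_ne (fun h => hq.1 h.symm)]
      · rfl

theorem maskApply_append (cs : List Char) (ps : List Nat) (k n p : Nat) :
    maskApply cs (ps ++ [p]) k n =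
      (if (n >>> (k + ps.length)) &&& 1 = 1 then
        (maskApply cs ps k n).set p ((PySem.Dict.get? turkishLetters ((maskApply cs ps k n).getD p ' ')).getD ' ')
      else maskApply cs ps k n) := by
  simp [maskApply, List.zipIdx_append, List.foldl_append]

theorem maskApply_congr (ps : List Nat) (cs : List Char) (k n m : Nat)
    (h : ∀ i < ps.length, (n >>> (k + i)) &&& 1 = (m >>> (k + i)) &&& 1) :
    maskApply cs ps k n = maskApply cs ps k m := by
  induction ps generalizing cs k with
  | nil => rfl
  | cons p t ih =>
      simp only [maskApply, List.zipIdx_cons, List.foldl_cons] at *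
      have h0 := h 0 (by simp)
      rw [Nat.add_zero] at h0
      have step : ∀ i < t.length, (n >>> (k + 1 + i)) &&& 1 = (m >>> (k + 1 + i)) &&& 1 := by
        intro i hi
        have hh := h (i + 1) (by simp [hi])
        have e : k + (i + 1) = k + 1 + i := by omega
        rwa [e] at hh
      rw [h0]
      split <;> exact ih _ _ step

theorem bit_self_lo (k n : Nat) (hn : n < 2 ^ k) : (n >>> k) &&& 1 = 0 := by
  have : n >>> k = 0 := by
    rw [Nat.shiftRight_eq_div_pow]; exact Nat.div_eq_of_lt hn
  simp [this]

theorem bit_self_hi (k n : Nat) (hn : n < 2 ^ k) : ((2 ^ k + n) >>> k) &&& 1 = 1 := by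
  have : (2 ^ k + n) >>> k = 1 := by
    rw [Nat.shiftRight_eq_div_pow, Nat.add_div_left _ (Nat.two_pow_pos k),
        Nat.div_eq_of_lt hn]
  simp [this]

theorem bit_lo (i k n : Nat) (hik : i < k) : ((2 ^ k + n) >>> i) &&& 1 = (n >>> i) &&& 1 := by
  have hk : 2 ^ k = 2 ^ (k - i) * 2 ^ i := by
    rw [← pow_add]; congr 1; omega
  have hdiv : (2 ^ k + n) >>> i = 2 ^ (k - i) + n >>> i := by
    rw [Nat.shiftRight_eq_div_pow, Nat.shiftRight_eq_div_pow, hk,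
        Nat.add_comm, Nat.add_mul_div_right _ _ (Nat.two_pow_pos i)]
    omega
  rw [hdiv, Nat.and_one_is_mod, Nat.and_one_is_mod]
  obtain ⟨c, hc⟩ : 2 ∣ 2 ^ (k - i) := dvd_pow_self 2 (by omega)
  omega

theorem main_inv (cs : List Char) : ∀ (rest : List Char) (j : Nat) (ps : List Nat),
    (∀ p ∈ ps, p < j) → (∀ p ∈ ps, p < cs.length) → cs.drop j = rest →
    (PySem.List.enumerate rest (j : Int)).foldl stepA ((List.range (2 ^ ps.length)).map (maskApply cs ps 0)) =
      (List.range (2 ^ (ps ++ posOf rest j).length)).map (maskApply cs (ps ++ posOf rest j) 0) := by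
  intro rest
  induction rest with
  | nil => intro j ps _ _ _; simp [PySem.List.enumerate_nil, posOf]
  | cons c rest' ih =>
      intro j ps hlt hlen hdrop
      have hjlt : j < cs.length := by
        by_contra hge
        rw [List.drop_eq_nil_of_le (by omega)] at hdrop
        exact List.cons_ne_nil c rest' hdrop.symm
      have hcs : cs[j] = c ∧ cs.drop (j + 1) = rest' := by
        rw [List.drop_eq_getElem_cons hjlt] at hdrop
        exact ⟨(List.cons.injEq _ _ _ _ ▸ hdrop).1, (List.cons.injEq _ _ _ _ ▸ hdrop).2⟩
      rw [PySem.List.enumerate_cons, List.foldl_cons,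
          show ((j : Int) + 1) = ((j + 1 : Nat) : Int) by push_cast; ring]
      by_cases hc : PySem.Dict.contains turkishLetters c
      · -- the letter is convertible: the while loop doubles the list
        have hS : ∀ s ∈ (List.range (2 ^ ps.length)).map (maskApply cs ps 0),
            (PySem.Dict.get? turkishLetters ((PySem.List.pyGet? s (j : Int)).getD ' ')).isSome := by
          intro s hs
          obtain ⟨n, _, rfl⟩ := List.mem_map.mp hs
          rw [PySem.List.pyGet?_natCast,
              List.getElem?_eq_getElem (by rw [maskApply_length]; exact hjlt)]
          have : (maskApply cs ps 0 n).getD j ' ' = c := by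
            rw [getD_maskApply_not_mem _ _ _ _ _ (fun hmem => absurd (hlt j hmem) (by omega)),
                List.getD, List.getElem?_eq_getElem hjlt]
            simpa using hcs.1
          simp only [Option.getD_some, List.getD] at this ⊢
          rw [List.getElem?_eq_getElem (by rw [maskApply_length]; exact hjlt)] at this
          simp only [Option.getD_some] at this
          rw [this, ← PySem.Dict.contains_eq_isSome_get?]
          exact hc
        have hstep : stepA ((List.range (2 ^ ps.length)).map (maskApply cs ps 0)) ((j : Int), c) =
            (List.range (2 ^ (ps ++ [j]).length)).map (maskApply cs (ps ++ [j]) 0) := by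
          unfold stepA
          rw [if_pos hc, whileA _ _ hS]
          -- both sides enumerate the doubled list: low half = old masks, high half = old masks + replace at j
          have hlen2 : (2 : Nat) ^ (ps ++ [j]).length = 2 ^ ps.length + 2 ^ ps.length := by
            simp [pow_succ]; ring
          rw [hlen2, List.range_add, List.map_append, List.map_map, List.map_map]
          refine congrArg₂ (· ++ ·) ?_ ?_
          · -- low half: bit ps.length is 0
            apply List.map_congr_left
            intro n hn
            rw [maskApply_append, if_neg]
            rw [Nat.zero_add, bit_self_lo _ _ (List.mem_range.mp hn)]
            omega
          · -- high half: bit ps.length is 1, lower bits unchanged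
            apply List.map_congr_left
            intro n hn
            have hn' := List.mem_range.mp hn
            simp only [Function.comp]
            have hcg : maskApply cs ps 0 (2 ^ ps.length + n) = maskApply cs ps 0 n :=
              maskApply_congr _ _ _ _ _ (fun i hi => by
                rw [Nat.zero_add, bit_lo i ps.length n hi])
            rw [maskApply_append, if_pos (by rw [Nat.zero_add]; exact bit_self_hi _ _ hn'), hcg]
            -- A appends fA; show it is the set at j of the same variant
            have hgd : (maskApply cs ps 0 n).getD j ' ' = c := by
              rw [getD_maskApply_not_mem _ _ _ _ _ (fun hmem => absurd (hlt j hmem) (by omega)),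
                  List.getD, List.getElem?_eq_getElem hjlt]
              simpa using hcs.1
            have hjs : j < (maskApply cs ps 0 n).length := by rw [maskApply_length]; exact hjlt
            unfold fA
            have hget : (maskApply cs ps 0 n)[j] = c := by
              rw [List.getD, List.getElem?_eq_getElem hjs, Option.getD_some] at hgd
              exact hgd
            rw [PySem.List.pyGet?_natCast, List.getElem?_eq_getElem hjs, Option.getD_some,
                PySem.List.slice_to_natCast,
                show ((j : Int) + 1) = ((j + 1 : Nat) : Int) by push_cast; ring,
                PySem.List.slice_from_natCast,
                List.set_eq_take_cons_drop _ hjs, hget, hgd]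
            rfl
        rw [hstep]
        have hpos : posOf (c :: rest') j = j :: posOf rest' (j + 1) := by
          simp [posOf, List.zipIdx_cons, hc]
        rw [hpos, show ps ++ j :: posOf rest' (j + 1) = (ps ++ [j]) ++ posOf rest' (j + 1) by simp]
        exact ih (j + 1) (ps ++ [j])
          (fun p hp => by rcases List.mem_append.mp hp with h' | h'
                          exacts [by have := hlt p h'; omega, by simp at h'; omega])
          (fun p hp => by rcases List.mem_append.mp hp with h' | h'
                          exacts [hlen p h', by simp at h'; omega])
          hcs.2
      · -- not convertible: the state is unchanged and j contributes no position
        have hstep : stepA ((List.range (2 ^ ps.length)).map (maskApply cs ps 0)) ((j : Int), c) =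
            (List.range (2 ^ ps.length)).map (maskApply cs ps 0) := by
          unfold stepA; rw [if_neg (by simpa using hc)]
        have hpos : posOf (c :: rest') j = posOf rest' (j + 1) := by
          simp [posOf, List.zipIdx_cons, hc]
        rw [hstep, hpos]
        exact ih (j + 1) ps (fun p hp => by have := hlt p hp; omega) hlen hcs.2

-- ===== VERDICT (by name: the statement is the Claim_ definition above) =====
theorem convert_to_turkish_letter_spec : Claim_equal_convert_to_turkish_letter := by
  intro s _
  unfold Spec_convert_to_turkish_letter convert_to_turkish_letter convert_to_turkish_letter_alt
  have h := main_inv s.toList s.toList 0 [] (by simp) (by simp) (by simp)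
  simp only [List.nil_append, Nat.cast_zero] at h
  have h0 : (List.range (2 ^ ([] : List Nat).length)).map (maskApply s.toList ([] : List Nat) 0) =
      [s.toList] := by
    simp [maskApply]
  rw [h0] at h
  rw [h]
  simp only [Nat.one_shiftLeft, List.map_map]
  rfl
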